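-- pv_equiv track=rewrite | github.com/gprielipp2026/si335 | ps3/prototypes/greedy3.py | indexWithMost
-- ===== SOURCE A (Python) =====
-- def count(A):
--     counts = {}
--     for el in A:
--         if el in counts:
--             counts[el] += 1
--         else:
--             counts[el] = 1
--     return counts
--
-- def indexWithMost(A, X, width):
--     left = 0
--     most = 0
--     # check as many as possible (up to len(A)-width)
--     for i in range(len(A)-width):
--         if A[i] == X:
--             c = count(A[i:i+width])[X]
--             # leaving it at > takes the first occurrence of the "max" value found
--             if c > most:
--                 left = i
--                 most = c
--
--     # check the last width amount:
--     try:
--         c = count(A[len(A) - width:])[X]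
--         if c > most:
--             left = len(A) - width
--     except:
--         pass
--
--     return left
-- ===== SOURCE B (Python) =====
-- def indexWithMost(A, X, width):
--     # Sliding window: maintain the running count of X in the window [i, i+width)
--     # instead of recounting each window from scratch.
--     n = len(A)
--     left = 0
--     most = 0
--     c = A[:width].count(X)
--     for i in range(n - width):
--         if A[i] == X and c > most:
--             left = i
--             most = c
--         c += (A[i + width] == X) - (A[i] == X)
--     if A[n - width:].count(X) > most:
--         left = n - width
--     return left
-- ===== Notes on version B (the rewrite author's own statement) =====
-- stated objective: alternative
-- what changed: B maintains a single running count of X in the current window, updated as the window slides, instead of A's rebuilding a full frequency dict of each width-slice at every hit; a timing run did not show a measurable speed advantage on the generated inputs, so no speed is claimed.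
import Mathlib
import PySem

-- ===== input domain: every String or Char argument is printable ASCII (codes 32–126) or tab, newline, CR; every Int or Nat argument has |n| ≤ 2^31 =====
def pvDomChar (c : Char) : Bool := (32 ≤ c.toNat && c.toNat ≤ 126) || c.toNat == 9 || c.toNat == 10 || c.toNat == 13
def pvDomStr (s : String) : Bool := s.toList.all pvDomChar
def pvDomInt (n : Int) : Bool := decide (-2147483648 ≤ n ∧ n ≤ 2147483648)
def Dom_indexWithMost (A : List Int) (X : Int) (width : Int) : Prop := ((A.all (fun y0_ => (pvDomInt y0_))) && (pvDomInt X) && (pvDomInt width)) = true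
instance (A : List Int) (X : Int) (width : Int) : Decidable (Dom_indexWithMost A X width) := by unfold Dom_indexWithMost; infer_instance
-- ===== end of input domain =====

-- B replaces A's per-hit frequency-dict recount of each width-slice by a sliding
-- window maintaining the running count of X — a different algorithm, same return value.

-- ===== PORT A =====

-- helper 'count' of A: dict built element by element
def pyCountA (l : List Int) : PySem.Dict Int Int :=
  l.foldl (fun counts el =>
    if counts.contains el = true then counts.modify el 0 (· + 1)
    else counts.insert el 1) PySem.Dict.empty

-- loop body of A's 'for i in range(len(A)-width)'
def loopA (A : List Int) (X width : Int) (s : Int × Int) (i : Int) : Int × Int :=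
  if PySem.List.pyGet? A i = some X then
    match (pyCountA (PySem.List.slice A (some i) (some (i + width)))).get? X with
    | some c => if c > s.2 then (i, c) else s
    | none => s          -- Python raises KeyError here; excluded by Pre_
  else s

def indexWithMost (A : List Int) (X : Int) (width : Int) : Int :=
  let n : Int := (A.length : Int)
  let s := (PySem.List.pyRange 0 (n - width) 1).foldl (loopA A X width) (0, 0)
  -- try: c = count(A[len(A)-width:])[X] … except: pass
  match (pyCountA (PySem.List.slice A (some (n - width)) none)).get? X with
  | some c => if c > s.2 then n - width else s.1
  | none => s.1

-- ===== PORT B =====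

-- loop body of B: state (left, most, running count of X in A[i:i+width])
def loopB (A : List Int) (X width : Int) (s : Int × Int × Int) (i : Int) : Int × Int × Int :=
  match s with
  | (left, most, c) =>
    let hit := PySem.List.pyGet? A i = some X
    let left' := if hit ∧ c > most then i else left
    let most' := if hit ∧ c > most then c else most
    (left', most', c + (if PySem.List.pyGet? A (i + width) = some X then (1 : Int) else 0)
                     - (if hit then (1 : Int) else 0))

def indexWithMost_alt (A : List Int) (X : Int) (width : Int) : Int :=
  let n : Int := (A.length : Int)
  let c0 : Int := ((PySem.List.slice A none (some width)).count X : Int)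
  let t := (PySem.List.pyRange 0 (n - width) 1).foldl (loopB A X width) (0, 0, c0)
  if ((PySem.List.slice A (some (n - width)) none).count X : Int) > t.2.1 then n - width else t.1

-- ===== PRECONDITION & SPEC =====
-- A raises on every width < 0 (IndexError/KeyError in the main loop) and on
-- width = 0 when X occurs in A (KeyError on an empty window); Pre_ excludes exactly those.
def Pre_indexWithMost (A : List Int) (X : Int) (width : Int) : Prop :=
  0 ≤ width ∧ (width = 0 → X ∉ A)
instance (A : List Int) (X : Int) (width : Int) : Decidable (Pre_indexWithMost A X width) := by
  unfold Pre_indexWithMost; infer_instance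

def pvWitness_indexWithMost : List Int × Int × Int := ([1, 0, 1, 1], 1, 2)

def Spec_indexWithMost (A : List Int) (X : Int) (width : Int) (out : Int) : Prop :=
  out = indexWithMost_alt A X width
instance (A : List Int) (X : Int) (width : Int) (out : Int) : Decidable (Spec_indexWithMost A X width out) := by
  unfold Spec_indexWithMost; infer_instance

-- ===== CLAIM (what is proved, stated in full; the proofs are below) =====
def Claim_equal_indexWithMost : Prop := ∀ (A : List Int) (X : Int) (width : Int), Dom_indexWithMost A X width → Pre_indexWithMost A X width → Spec_indexWithMost A X width (indexWithMost A X width)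

-- ===== LEMMAS AND PROOFS =====

theorem countBranch_eq (d : PySem.Dict Int Int) (el : Int) :
    (if d.contains el = true then d.modify el 0 (· + 1) else d.insert el 1) = d.modify el 0 (· + 1) := by
  by_cases h : d.contains el
  · simp [h]
  · simp only [Bool.not_eq_true] at h
    simp [PySem.Dict.insert, PySem.Dict.modify, PySem.Dict.getD_of_not_contains, h]

theorem pyCountA_eq_counter (l : List Int) : pyCountA l = PySem.Dict.counter l := by
  rw [PySem.Dict.counter_eq_foldl]
  unfold pyCountA
  apply PySem.List.foldl_congr_mem
  intro d x _
  exact countBranch_eq d x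

theorem pyCountA_get?_of_mem (l : List Int) (X : Int) (h : X ∈ l) :
    (pyCountA l).get? X = some ((l.count X : Int)) := by
  rw [pyCountA_eq_counter]
  have hc : (PySem.Dict.counter l).contains X := by
    rw [PySem.Dict.contains_counter]; simpa using h
  have hs := (PySem.Dict.contains_eq_isSome_get? (PySem.Dict.counter l) X) ▸ hc
  obtain ⟨v, hv⟩ := Option.isSome_iff_exists.mp hs
  have := PySem.Dict.getD_of_get?_eq_some (PySem.Dict.counter l) 0 hv
  rw [PySem.Dict.getD_counter] at this
  rw [hv, this]

theorem pyCountA_get?_of_not_mem (l : List Int) (X : Int) (h : X ∉ l) :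
    (pyCountA l).get? X = none := by
  rw [pyCountA_eq_counter,
    PySem.Dict.get?_eq_none_iff_not_mem_keys, PySem.Dict.keys_counter]
  intro hx
  exact h ((PySem.Set.mem_ofList _ _).mp hx)

-- sliding-window step: count of X in the window shifted by one
theorem slide_count (A : List Int) (X : Int) (jn w : Nat) (hw : 1 ≤ w) (h : jn + w < A.length) :
    (((A.drop (jn + 1)).take w).count X : Int)
      = (((A.drop jn).take w).count X : Int)
        + (if A[jn + w]'(h) = X then (1:Int) else 0)
        - (if A[jn]'(by omega) = X then (1:Int) else 0) := by
  obtain ⟨v, rfl⟩ : ∃ v, w = v + 1 := ⟨w - 1, by omega⟩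
  have hdrop : A.drop jn = A[jn]'(by omega) :: A.drop (jn + 1) := List.drop_eq_getElem_cons (by omega)
  have htake : (A.drop (jn+1)).take (v+1) = (A.drop (jn+1)).take v ++ [A[jn + (v+1)]'(by omega)] := by
    rw [List.take_add_one]
    congr 1
    rw [List.getElem?_drop, List.getElem?_eq_getElem (by omega)]
    simp
    congr 1
    omega
  rw [htake, hdrop, List.take_succ_cons, List.count_cons, List.count_append]
  simp [List.count_cons, beq_iff_eq]
  split_ifs <;> omega

theorem mem_window (A : List Int) (jn w : Nat) (hw : 1 ≤ w) (h : jn < A.length) :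
    A[jn]'(h) ∈ (A.drop jn).take w := by
  obtain ⟨v, rfl⟩ : ∃ v, w = v + 1 := ⟨w - 1, by omega⟩
  rw [List.drop_eq_getElem_cons h, List.take_succ_cons]
  exact List.mem_cons_self ..

-- main loop equivalence for width ≥ 1 (running count = recount of the current window)
theorem loop_eq (A : List Int) (X width : Int) (hw : 1 ≤ width) :
    ∀ (k : Nat) (j left most : Int), 0 ≤ j → 0 ≤ most →
      j + (k : Int) = (A.length : Int) - width →
      (PySem.List.pyRange j ((A.length : Int) - width) 1).foldl (loopA A X width) (left, most)
        = (((PySem.List.pyRange j ((A.length : Int) - width) 1).foldl (loopB A X width)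
             (left, most, (((A.drop j.toNat).take width.toNat).count X : Int))).1,
           ((PySem.List.pyRange j ((A.length : Int) - width) 1).foldl (loopB A X width)
             (left, most, (((A.drop j.toNat).take width.toNat).count X : Int))).2.1)
      ∧ 0 ≤ ((PySem.List.pyRange j ((A.length : Int) - width) 1).foldl (loopA A X width) (left, most)).2 := by
  intro k
  induction k with
  | zero =>
    intro j left most h0j h0m hk
    rw [PySem.List.pyRange_one_eq_nil (by omega)]
    exact ⟨rfl, h0m⟩
  | succ k ih =>
    intro j left most h0j h0m hk
    have hjlt : j < (A.length : Int) - width := by omega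
    have hwn1 : 1 ≤ width.toNat := by omega
    have hbound : j.toNat + width.toNat < A.length := by omega
    have hjlen : j.toNat < A.length := by omega
    have hget : PySem.List.pyGet? A j = some (A[j.toNat]'(hjlen)) :=
      PySem.List.pyGet?_eq_some_getElem _ h0j (by omega)
    have hget2 : PySem.List.pyGet? A (j + width) = some (A[j.toNat + width.toNat]'(hbound)) := by
      rw [PySem.List.pyGet?_of_nonneg _ (by omega : (0:Int) ≤ j + width),
        show (j + width).toNat = j.toNat + width.toNat by omega]
      exact List.getElem?_eq_getElem hbound
    have hslice : PySem.List.slice A (some j) (some (j + width))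
        = (A.drop j.toNat).take width.toNat := by
      rw [PySem.List.slice_toNat _ h0j (by omega)]
      congr 1
      omega
    have htonat1 : (j + 1).toNat = j.toNat + 1 := by omega
    have hcpos : (0:Int) ≤ (((A.drop j.toNat).take width.toNat).count X : Int) := Int.natCast_nonneg _
    have hslide := slide_count A X j.toNat width.toNat hwn1 hbound
    rw [PySem.List.pyRange_one_cons hjlt]
    simp only [List.foldl_cons]
    by_cases hhit : A[j.toNat]'(hjlen) = X
    · have hmem : X ∈ (A.drop j.toNat).take width.toNat :=
        hhit ▸ mem_window A j.toNat width.toNat hwn1 hjlen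
      have hA : loopA A X width (left, most) j
          = if (((A.drop j.toNat).take width.toNat).count X : Int) > most
            then (j, (((A.drop j.toNat).take width.toNat).count X : Int)) else (left, most) := by
        unfold loopA
        rw [if_pos (by rw [hget, hhit]), hslice, pyCountA_get?_of_mem _ _ hmem]
      have hB : loopB A X width (left, most, (((A.drop j.toNat).take width.toNat).count X : Int)) j
          = ((if (((A.drop j.toNat).take width.toNat).count X : Int) > most
              then j else left),
             (if (((A.drop j.toNat).take width.toNat).count X : Int) > most
              then (((A.drop j.toNat).take width.toNat).count X : Int) else most),
             (((A.drop (j.toNat + 1)).take width.toNat).count X : Int)) := by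
        simp only [loopB, hget, hget2, Option.some.injEq, hhit]
        simp only [hslide]
        simp [hhit]
      rw [hA, hB]
      by_cases hcm : (((A.drop j.toNat).take width.toNat).count X : Int) > most
      · simp only [if_pos hcm]
        have := ih (j + 1) j (((A.drop j.toNat).take width.toNat).count X : Int)
          (by omega) hcpos (by omega)
        rwa [htonat1] at this
      · simp only [if_neg hcm]
        have := ih (j + 1) left most (by omega) h0m (by omega)
        rwa [htonat1] at this
    · have hA : loopA A X width (left, most) j = (left, most) := by
        unfold loopA
        rw [if_neg (by rw [hget]; simpa using hhit)]
      have hB : loopB A X width (left, most, (((A.drop j.toNat).take width.toNat).count X : Int)) j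
          = (left, most, (((A.drop (j.toNat + 1)).take width.toNat).count X : Int)) := by
        simp only [loopB, hget, hget2, Option.some.injEq]
        simp only [hslide]
        simp [hhit]
      rw [hA, hB]
      have := ih (j + 1) left most (by omega) h0m (by omega)
      rwa [htonat1] at this

theorem foldA_id (A : List Int) (X width : Int) (hX : X ∉ A) :
    ∀ (l : List Int) (s : Int × Int), l.foldl (loopA A X width) s = s := by
  intro l
  induction l with
  | nil => intro s; rfl
  | cons x xs ih =>
    intro s
    rw [List.foldl_cons]
    have hstep : loopA A X width s x = s := by
      unfold loopA
      rw [if_neg]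
      intro hc
      exact hX (PySem.List.mem_of_pyGet?_eq_some _ hc)
    rw [hstep]; exact ih s

theorem foldB_keep (A : List Int) (X width : Int) (hX : X ∉ A) :
    ∀ (l : List Int) (s : Int × Int × Int),
      (l.foldl (loopB A X width) s).1 = s.1 ∧ (l.foldl (loopB A X width) s).2.1 = s.2.1 := by
  intro l
  induction l with
  | nil => intro s; exact ⟨rfl, rfl⟩
  | cons x xs ih =>
    intro s
    rw [List.foldl_cons]
    have hmiss : ¬ (PySem.List.pyGet? A x = some X) := by
      intro hc
      exact hX (PySem.List.mem_of_pyGet?_eq_some _ hc)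
    have hstep : (loopB A X width s x).1 = s.1 ∧ (loopB A X width s x).2.1 = s.2.1 := by
      obtain ⟨l0, m0, c0⟩ := s
      simp [loopB, hmiss]
    obtain ⟨h1, h2⟩ := ih (loopB A X width s x)
    exact ⟨(ih _).1.trans hstep.1, (ih _).2.trans hstep.2⟩

-- the final 'try' block agrees once the loop results agree and most ≥ 0
theorem tail_eq (A : List Int) (X nw left most : Int) (hm : 0 ≤ most) :
    (match (pyCountA (PySem.List.slice A (some nw) none)).get? X with
      | some c => if c > most then nw else left
      | none => left)
    = if ((PySem.List.slice A (some nw) none).count X : Int) > most then nw else left := by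
  by_cases h : X ∈ PySem.List.slice A (some nw) none
  · rw [pyCountA_get?_of_mem _ _ h]
  · rw [pyCountA_get?_of_not_mem _ _ h]
    have h0 : (PySem.List.slice A (some nw) none).count X = 0 := List.count_eq_zero.mpr h
    rw [h0]
    have : ¬ ((0:Int) > most) := by omega
    simp [this]

-- ===== VERDICT (by name: the statement is the Claim_ definition above) =====
theorem indexWithMost_spec : Claim_equal_indexWithMost := by
  unfold Claim_equal_indexWithMost
  intro A X width _ hPre
  obtain ⟨hw0, hw0'⟩ := hPre
  unfold Spec_indexWithMost indexWithMost indexWithMost_alt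
  simp only
  set n : Int := (A.length : Int) with hn
  set c0 : Int := ((PySem.List.slice A none (some width)).count X : Int) with hc0
  set fA := (PySem.List.pyRange 0 (n - width) 1).foldl (loopA A X width) (0, 0) with hfA
  set fB := (PySem.List.pyRange 0 (n - width) 1).foldl (loopB A X width) (0, 0, c0) with hfB
  have hMain : fA = (fB.1, fB.2.1) ∧ 0 ≤ fA.2 := by
    rcases lt_or_ge width 1 with hlt | hge
    · have hwz : width = 0 := by omega
      have hX : X ∉ A := hw0' hwz
      have hB := foldB_keep A X width hX (PySem.List.pyRange 0 (n - width) 1) (0, 0, c0)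
      have hA := foldA_id A X width hX (PySem.List.pyRange 0 (n - width) 1) (0, 0)
      rw [hfA, hfB, hA]
      refine ⟨?_, by norm_num⟩
      rw [hB.1, hB.2]
    · rcases lt_or_ge (n - width) 0 with hneg | hpos
      · rw [hfA, hfB, PySem.List.pyRange_one_eq_nil (by omega)]
        exact ⟨rfl, le_rfl⟩
      · have hc0' : c0 = (((A.drop (0:Int).toNat).take width.toNat).count X : Int) := by
          rw [hc0, PySem.List.slice_to _ (by omega : (0:Int) ≤ width)]
          norm_num
        have hloop := loop_eq A X width hge (n - width).toNat 0 0 0 le_rfl le_rfl (by omega)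
        rw [hfA, hfB, hc0', hn]
        exact hloop
  obtain ⟨h1, h2⟩ := hMain
  have e1 : fA.1 = fB.1 := by rw [h1]
  have e2 : fA.2 = fB.2.1 := by rw [h1]
  rw [← e1, ← e2]
  exact tail_eq A X (n - width) fA.1 fA.2 h2
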